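-- pv_equiv track=rewrite | github.com/nmpogg/CodePTIT | python/ThucHanh2/SoLocPhat.py | count_lucky_digits
-- ===== SOURCE A (Python) =====
-- def count_lucky_digits(N):
--     count = N // 8
--     total_count = 0
--
--     for k in range(1, count + 1):
--         number = 8 * k
--         while number > 0:
--             digit = number % 10
--             if digit == 6 or digit == 8:
--                 total_count += 1
--             number //= 10
--
--     return total_count
-- ===== SOURCE B (Python) =====
-- def count_lucky_digits(N):
--     # Digit DP: S(m, M) = sum over x in [1, M] with m | x of (number of digits of x
--     # that are 6 or 8).  Splitting x = 10*q + r reduces S(m, M) to S-values at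
--     # Q - 1 = M//10 - 1 for the divisors m in {1, 2, 4, 8}, so the whole answer
--     # S(8, N) is computed in O(log N) recursive levels instead of enumerating
--     # every multiple of 8.
--
--     def luck(r):
--         return 1 if r == 6 or r == 8 else 0
--
--     def f(n):
--         # digit-6/8 count of a single number
--         t = 0
--         while n > 0:
--             t += luck(n % 10)
--             n //= 10
--         return t
--
--     def S(m, M):
--         if M < 0:
--             return 0
--         Q, d = M // 10, M % 10
--         if m == 1:
--             res = 10 * S(1, Q - 1) + 2 * Q
--         elif m == 2:
--             res = 5 * S(1, Q - 1) + 2 * Q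
--         elif m == 4:
--             res = 2 * S(1, Q - 1) + S(2, Q - 1) + Q
--         else:  # m == 8
--             a, b = Q // 4, Q % 4
--             res = S(1, Q - 1) + S(4, Q - 1) + 2 * a + min(b, 2)
--         fQ = f(Q)
--         for r in range(0, d + 1):
--             if (10 * Q + r) % m == 0:
--                 res += fQ + luck(r)
--         return res
--
--     return S(8, N)
-- ===== Notes on version B (the rewrite author's own statement) =====
-- stated objective: faster
-- what changed: B replaces A's enumeration of every multiple of 8 with a digit-DP recursion: splitting x = 10*q + r reduces the sum of 6/8-digit counts over multiples of m in {1,2,4,8} up to M to the same sums at M//10 - 1 plus closed-form correction terms, giving O(log N) recursion levels.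
import Mathlib
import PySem

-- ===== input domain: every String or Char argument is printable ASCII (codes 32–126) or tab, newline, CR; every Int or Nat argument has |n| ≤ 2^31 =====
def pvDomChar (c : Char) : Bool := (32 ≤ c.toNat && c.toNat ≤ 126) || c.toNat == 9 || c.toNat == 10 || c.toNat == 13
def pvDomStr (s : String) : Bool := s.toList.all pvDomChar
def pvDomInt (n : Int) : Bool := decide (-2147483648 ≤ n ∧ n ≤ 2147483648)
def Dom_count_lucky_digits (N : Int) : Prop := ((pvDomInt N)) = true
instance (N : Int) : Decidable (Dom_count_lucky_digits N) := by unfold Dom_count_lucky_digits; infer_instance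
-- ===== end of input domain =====

-- B replaces A's enumeration of every multiple of 8 by a digit-DP recursion on the
-- decimal representation (O(log N) recursion levels); objective: faster (asymptotic).

-- ===== PORT A =====
-- the 'while number > 0' loop of A, threading A's total_count accumulator
-- (fuel-guarded structural recursion; number.toNat steps are always enough fuel)
def pvDigitLoopF : Nat → Int → Int → Int
  | 0, _, total_count => total_count
  | fuel + 1, number, total_count =>
    if number > 0 then
      let digit := PySem.Int.mod number 10
      pvDigitLoopF fuel (PySem.Int.floordiv number 10)
        (if digit = 6 ∨ digit = 8 then total_count + 1 else total_count)
    else total_count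

def pvDigitLoop (number total_count : Int) : Int :=
  pvDigitLoopF number.toNat number total_count

def count_lucky_digits (N : Int) : Int :=
  -- count = N // 8 (inlined; it is used once)
  (PySem.List.pyRange 1 (PySem.Int.floordiv N 8 + 1) 1).foldl
    (fun total_count k => pvDigitLoop (8 * k) total_count) 0

-- ===== PORT B =====
-- B's helper luck(r)
def pvLuck (r : Int) : Int := if r = 6 ∨ r = 8 then 1 else 0

-- B's helper f(n): the digit-6/8 count of one number, threading its accumulator t
def pvFLoopF : Nat → Int → Int → Int
  | 0, _, t => t
  | fuel + 1, n, t =>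
    if n > 0 then pvFLoopF fuel (PySem.Int.floordiv n 10) (t + pvLuck (PySem.Int.mod n 10))
    else t

def pvFLoop (n t : Int) : Int := pvFLoopF n.toNat n t

-- B's digit-DP recursion S(m, M) (fuel-guarded; the recursion argument drops from M
-- to M // 10 - 1, so (M + 1).toNat + 1 fuel is always enough)
def pvSF : Nat → Int → Int → Int
  | 0, _, _ => 0
  | fuel + 1, m, M =>
    if M < 0 then 0
    else
      let Q := PySem.Int.floordiv M 10
      let d := PySem.Int.mod M 10
      let res :=
        if m = 1 then 10 * pvSF fuel 1 (Q - 1) + 2 * Q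
        else if m = 2 then 5 * pvSF fuel 1 (Q - 1) + 2 * Q
        else if m = 4 then 2 * pvSF fuel 1 (Q - 1) + pvSF fuel 2 (Q - 1) + Q
        else pvSF fuel 1 (Q - 1) + pvSF fuel 4 (Q - 1)
               + 2 * PySem.Int.floordiv Q 4 + min (PySem.Int.mod Q 4) 2
      let fQ := pvFLoop Q 0
      (PySem.List.pyRange 0 (d + 1) 1).foldl
        (fun res r => if PySem.Int.mod (10 * Q + r) m = 0 then res + fQ + pvLuck r else res)
        res

def pvS (m M : Int) : Int := pvSF ((M + 1).toNat + 1) m M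

def count_lucky_digits_alt (N : Int) : Int := pvS 8 N

-- ===== PRECONDITION & SPEC =====
def Spec_count_lucky_digits (N : Int) (out : Int) : Prop := out = count_lucky_digits_alt N
instance (N : Int) (out : Int) : Decidable (Spec_count_lucky_digits N out) := by unfold Spec_count_lucky_digits; infer_instance

-- ===== CLAIM (what is proved, stated in full; the proofs are below) =====
def Claim_equal_count_lucky_digits : Prop := ∀ (N : Int), Dom_count_lucky_digits N → Spec_count_lucky_digits N (count_lucky_digits N)

-- ===== LEMMAS AND PROOFS =====

-- digit-6/8 count on ℕ, and the common specification sum T m n = Σ_{x < n, m ∣ x} pvG x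
def luckN (r : ℕ) : ℕ := if r = 6 ∨ r = 8 then 1 else 0

def pvG (n : ℕ) : ℕ :=
  luckN (n % 10) + (if h : n / 10 = 0 then 0 else pvG (n / 10))
termination_by n
decreasing_by omega

def pvT (m n : ℕ) : ℕ := ∑ x ∈ Finset.range n, if m ∣ x then pvG x else 0

lemma pvG_zero : pvG 0 = 0 := by rw [pvG]; simp [luckN]

lemma pvG_step (n : ℕ) : pvG n = luckN (n % 10) + pvG (n / 10) := by
  rw [pvG]
  by_cases h : n / 10 = 0
  · rw [dif_pos h, h, pvG_zero]
  · rw [dif_neg h]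

lemma pvG_split (q r : ℕ) (h : r < 10) : pvG (10 * q + r) = pvG q + luckN r := by
  rw [pvG_step (10 * q + r)]
  have h1 : (10 * q + r) % 10 = r := by omega
  have h2 : (10 * q + r) / 10 = q := by omega
  rw [h1, h2, Nat.add_comm]

lemma pvLuck_cast (r : ℕ) : pvLuck (r : ℤ) = (luckN r : ℤ) := by
  unfold pvLuck luckN
  by_cases h6 : r = 6
  · simp [h6]
  · by_cases h8 : r = 8
    · simp [h8]
    · rw [if_neg, if_neg]
      · simp
      · omega
      · omega

-- ---- A's loop computes pvG ----
lemma pvDigitLoopF_eq_pvG : ∀ (fuel : ℕ) (n : ℕ) (t : Int), n ≤ fuel →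
    pvDigitLoopF fuel (n : Int) t = t + (pvG n : Int) := by
  intro fuel
  induction fuel with
  | zero =>
    intro n t hn
    have : n = 0 := by omega
    subst this
    rw [pvDigitLoopF, pvG_zero]
    simp
  | succ f ih =>
    intro n t hn
    rw [pvDigitLoopF]
    by_cases hp : (n : Int) > 0
    · have hp' : 0 < n := by exact_mod_cast hp
      rw [if_pos hp]
      have hmod : PySem.Int.mod (n : Int) 10 = ((n % 10 : Nat) : Int) := by
        exact_mod_cast PySem.Int.mod_natCast n 10
      have hdiv : PySem.Int.floordiv (n : Int) 10 = ((n / 10 : Nat) : Int) := by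
        exact_mod_cast PySem.Int.floordiv_natCast n 10
      rw [hmod, hdiv, ih (n / 10) _ (by omega), pvG_step n]
      have hcond : (((n % 10 : Nat) : Int) = 6 ∨ ((n % 10 : Nat) : Int) = 8)
          ↔ (n % 10 = 6 ∨ n % 10 = 8) := by omega
      by_cases hb : n % 10 = 6 ∨ n % 10 = 8
      · rw [if_pos (hcond.mpr hb)]
        unfold luckN
        rw [if_pos hb]
        push_cast; ring
      · rw [if_neg (fun hh => hb (hcond.mp hh))]
        unfold luckN
        rw [if_neg hb]
        push_cast; ring
    · rw [if_neg hp]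
      have : n = 0 := by omega
      subst this
      rw [pvG_zero]
      simp

lemma pvDigitLoop_eq_pvG (n : ℕ) (t : Int) : pvDigitLoop (n : Int) t = t + (pvG n : Int) := by
  unfold pvDigitLoop
  exact pvDigitLoopF_eq_pvG _ n t (by omega)

-- ---- B's f loop computes pvG ----
lemma pvFLoopF_eq_pvG : ∀ (fuel : ℕ) (n : ℕ) (t : Int), n ≤ fuel →
    pvFLoopF fuel (n : Int) t = t + (pvG n : Int) := by
  intro fuel
  induction fuel with
  | zero =>
    intro n t hn
    have : n = 0 := by omega
    subst this
    rw [pvFLoopF, pvG_zero]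
    simp
  | succ f ih =>
    intro n t hn
    rw [pvFLoopF]
    by_cases hp : (n : Int) > 0
    · have hp' : 0 < n := by exact_mod_cast hp
      rw [if_pos hp]
      have hmod : PySem.Int.mod (n : Int) 10 = ((n % 10 : Nat) : Int) := by
        exact_mod_cast PySem.Int.mod_natCast n 10
      have hdiv : PySem.Int.floordiv (n : Int) 10 = ((n / 10 : Nat) : Int) := by
        exact_mod_cast PySem.Int.floordiv_natCast n 10
      rw [hmod, hdiv, pvLuck_cast, ih (n / 10) _ (by omega), pvG_step n]
      push_cast; ring
    · rw [if_neg hp]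
      have : n = 0 := by omega
      subst this
      rw [pvG_zero]
      simp

lemma pvFLoop_eq_pvG (n : ℕ) (t : Int) : pvFLoop (n : Int) t = t + (pvG n : Int) := by
  unfold pvFLoop
  exact pvFLoopF_eq_pvG _ n t (by omega)

-- ---- splitting a range sum ----
lemma pv_sum_range_add (f : ℕ → ℕ) (a b : ℕ) :
    ∑ x ∈ Finset.range (a + b), f x
      = (∑ x ∈ Finset.range a, f x) + ∑ x ∈ Finset.range b, f (a + x) := by
  induction b with
  | zero => simp
  | succ b ih => rw [← Nat.add_assoc, Finset.sum_range_succ, Finset.sum_range_succ, ih]; ring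

lemma pv_sum_range_blocks (f : ℕ → ℕ) (Q : ℕ) :
    ∑ x ∈ Finset.range (10 * Q), f x
      = ∑ q ∈ Finset.range Q, ∑ r ∈ Finset.range 10, f (10 * q + r) := by
  induction Q with
  | zero => simp
  | succ Q ih =>
      have h : 10 * (Q + 1) = 10 * Q + 10 := by ring
      rw [h, pv_sum_range_add, ih,
        Finset.sum_range_succ (f := fun q => ∑ r ∈ Finset.range 10, f (10 * q + r))]

-- ---- the decomposition of pvT along x = 10*q + r ----
lemma pvT_decompose (m n : ℕ) :
    pvT m (n + 1)
      = (∑ q ∈ Finset.range (n / 10), ∑ r ∈ Finset.range 10,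
           if m ∣ 10 * q + r then pvG q + luckN r else 0)
        + ∑ r ∈ Finset.range (n % 10 + 1),
            if m ∣ 10 * (n / 10) + r then pvG (n / 10) + luckN r else 0 := by
  have hsplit : n + 1 = 10 * (n / 10) + (n % 10 + 1) := by omega
  unfold pvT
  rw [hsplit, pv_sum_range_add, pv_sum_range_blocks]
  congr 1
  · refine Finset.sum_congr rfl fun q _ => Finset.sum_congr rfl fun r hr => ?_
    have hr10 : r < 10 := Finset.mem_range.mp hr
    rw [pvG_split q r hr10]
  · refine Finset.sum_congr rfl fun r hr => ?_
    have hr10 : r < 10 := by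
      have := Finset.mem_range.mp hr
      omega
    rw [pvG_split (n / 10) r hr10]

-- ---- closed forms of the inner sums over one decimal block ----
lemma pv_inner1 (q : ℕ) :
    (∑ r ∈ Finset.range 10, if 1 ∣ 10 * q + r then pvG q + luckN r else 0)
      = 10 * pvG q + 2 := by
  simp [Finset.sum_range_succ, luckN]
  ring

lemma pv_inner2 (q : ℕ) :
    (∑ r ∈ Finset.range 10, if 2 ∣ 10 * q + r then pvG q + luckN r else 0)
      = 5 * pvG q + 2 := by
  simp only [Finset.sum_range_succ, Finset.sum_range_zero]
  rw [if_pos (show (2:ℕ) ∣ 10 * q + 0 by omega),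
      if_neg (show ¬ (2:ℕ) ∣ 10 * q + 1 by omega),
      if_pos (show (2:ℕ) ∣ 10 * q + 2 by omega),
      if_neg (show ¬ (2:ℕ) ∣ 10 * q + 3 by omega),
      if_pos (show (2:ℕ) ∣ 10 * q + 4 by omega),
      if_neg (show ¬ (2:ℕ) ∣ 10 * q + 5 by omega),
      if_pos (show (2:ℕ) ∣ 10 * q + 6 by omega),
      if_neg (show ¬ (2:ℕ) ∣ 10 * q + 7 by omega),
      if_pos (show (2:ℕ) ∣ 10 * q + 8 by omega),
      if_neg (show ¬ (2:ℕ) ∣ 10 * q + 9 by omega)]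
  norm_num [luckN]
  ring

lemma pv_inner4 (q : ℕ) :
    (∑ r ∈ Finset.range 10, if 4 ∣ 10 * q + r then pvG q + luckN r else 0)
      = 2 * pvG q + 1 + (if 2 ∣ q then pvG q else 0) := by
  obtain ⟨t, rfl | rfl⟩ : ∃ t, q = 2 * t ∨ q = 2 * t + 1 := ⟨q / 2, by omega⟩
  · rw [if_pos (show (2:ℕ) ∣ 2 * t by omega)]
    simp only [Finset.sum_range_succ, Finset.sum_range_zero]
    rw [if_pos (show (4:ℕ) ∣ 10 * (2 * t) + 0 by omega),
        if_neg (show ¬ (4:ℕ) ∣ 10 * (2 * t) + 1 by omega),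
        if_neg (show ¬ (4:ℕ) ∣ 10 * (2 * t) + 2 by omega),
        if_neg (show ¬ (4:ℕ) ∣ 10 * (2 * t) + 3 by omega),
        if_pos (show (4:ℕ) ∣ 10 * (2 * t) + 4 by omega),
        if_neg (show ¬ (4:ℕ) ∣ 10 * (2 * t) + 5 by omega),
        if_neg (show ¬ (4:ℕ) ∣ 10 * (2 * t) + 6 by omega),
        if_neg (show ¬ (4:ℕ) ∣ 10 * (2 * t) + 7 by omega),
        if_pos (show (4:ℕ) ∣ 10 * (2 * t) + 8 by omega),
        if_neg (show ¬ (4:ℕ) ∣ 10 * (2 * t) + 9 by omega)]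
    norm_num [luckN]
    ring
  · rw [if_neg (show ¬ (2:ℕ) ∣ 2 * t + 1 by omega)]
    simp only [Finset.sum_range_succ, Finset.sum_range_zero]
    rw [if_neg (show ¬ (4:ℕ) ∣ 10 * (2 * t + 1) + 0 by omega),
        if_neg (show ¬ (4:ℕ) ∣ 10 * (2 * t + 1) + 1 by omega),
        if_pos (show (4:ℕ) ∣ 10 * (2 * t + 1) + 2 by omega),
        if_neg (show ¬ (4:ℕ) ∣ 10 * (2 * t + 1) + 3 by omega),
        if_neg (show ¬ (4:ℕ) ∣ 10 * (2 * t + 1) + 4 by omega),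
        if_neg (show ¬ (4:ℕ) ∣ 10 * (2 * t + 1) + 5 by omega),
        if_pos (show (4:ℕ) ∣ 10 * (2 * t + 1) + 6 by omega),
        if_neg (show ¬ (4:ℕ) ∣ 10 * (2 * t + 1) + 7 by omega),
        if_neg (show ¬ (4:ℕ) ∣ 10 * (2 * t + 1) + 8 by omega),
        if_neg (show ¬ (4:ℕ) ∣ 10 * (2 * t + 1) + 9 by omega)]
    norm_num [luckN]
    ring

lemma pv_inner8 (q : ℕ) :
    (∑ r ∈ Finset.range 10, if 8 ∣ 10 * q + r then pvG q + luckN r else 0)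
      = pvG q + (if 4 ∣ q then pvG q else 0) + (if q % 4 ≤ 1 then 1 else 0) := by
  obtain ⟨t, rfl | rfl | rfl | rfl⟩ :
      ∃ t, q = 4 * t ∨ q = 4 * t + 1 ∨ q = 4 * t + 2 ∨ q = 4 * t + 3 := ⟨q / 4, by omega⟩
  · rw [if_pos (show (4:ℕ) ∣ 4 * t by omega), if_pos (show 4 * t % 4 ≤ 1 by omega)]
    simp only [Finset.sum_range_succ, Finset.sum_range_zero]
    rw [if_pos (show (8:ℕ) ∣ 10 * (4 * t) + 0 by omega),
        if_neg (show ¬ (8:ℕ) ∣ 10 * (4 * t) + 1 by omega),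
        if_neg (show ¬ (8:ℕ) ∣ 10 * (4 * t) + 2 by omega),
        if_neg (show ¬ (8:ℕ) ∣ 10 * (4 * t) + 3 by omega),
        if_neg (show ¬ (8:ℕ) ∣ 10 * (4 * t) + 4 by omega),
        if_neg (show ¬ (8:ℕ) ∣ 10 * (4 * t) + 5 by omega),
        if_neg (show ¬ (8:ℕ) ∣ 10 * (4 * t) + 6 by omega),
        if_neg (show ¬ (8:ℕ) ∣ 10 * (4 * t) + 7 by omega),
        if_pos (show (8:ℕ) ∣ 10 * (4 * t) + 8 by omega),
        if_neg (show ¬ (8:ℕ) ∣ 10 * (4 * t) + 9 by omega)]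
    norm_num [luckN]
    ring
  · rw [if_neg (show ¬ (4:ℕ) ∣ 4 * t + 1 by omega), if_pos (show (4 * t + 1) % 4 ≤ 1 by omega)]
    simp only [Finset.sum_range_succ, Finset.sum_range_zero]
    rw [if_neg (show ¬ (8:ℕ) ∣ 10 * (4 * t + 1) + 0 by omega),
        if_neg (show ¬ (8:ℕ) ∣ 10 * (4 * t + 1) + 1 by omega),
        if_neg (show ¬ (8:ℕ) ∣ 10 * (4 * t + 1) + 2 by omega),
        if_neg (show ¬ (8:ℕ) ∣ 10 * (4 * t + 1) + 3 by omega),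
        if_neg (show ¬ (8:ℕ) ∣ 10 * (4 * t + 1) + 4 by omega),
        if_neg (show ¬ (8:ℕ) ∣ 10 * (4 * t + 1) + 5 by omega),
        if_pos (show (8:ℕ) ∣ 10 * (4 * t + 1) + 6 by omega),
        if_neg (show ¬ (8:ℕ) ∣ 10 * (4 * t + 1) + 7 by omega),
        if_neg (show ¬ (8:ℕ) ∣ 10 * (4 * t + 1) + 8 by omega),
        if_neg (show ¬ (8:ℕ) ∣ 10 * (4 * t + 1) + 9 by omega)]
    norm_num [luckN]
  · rw [if_neg (show ¬ (4:ℕ) ∣ 4 * t + 2 by omega), if_neg (show ¬ (4 * t + 2) % 4 ≤ 1 by omega)]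
    simp only [Finset.sum_range_succ, Finset.sum_range_zero]
    rw [if_neg (show ¬ (8:ℕ) ∣ 10 * (4 * t + 2) + 0 by omega),
        if_neg (show ¬ (8:ℕ) ∣ 10 * (4 * t + 2) + 1 by omega),
        if_neg (show ¬ (8:ℕ) ∣ 10 * (4 * t + 2) + 2 by omega),
        if_neg (show ¬ (8:ℕ) ∣ 10 * (4 * t + 2) + 3 by omega),
        if_pos (show (8:ℕ) ∣ 10 * (4 * t + 2) + 4 by omega),
        if_neg (show ¬ (8:ℕ) ∣ 10 * (4 * t + 2) + 5 by omega),
        if_neg (show ¬ (8:ℕ) ∣ 10 * (4 * t + 2) + 6 by omega),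
        if_neg (show ¬ (8:ℕ) ∣ 10 * (4 * t + 2) + 7 by omega),
        if_neg (show ¬ (8:ℕ) ∣ 10 * (4 * t + 2) + 8 by omega),
        if_neg (show ¬ (8:ℕ) ∣ 10 * (4 * t + 2) + 9 by omega)]
    norm_num [luckN]
  · rw [if_neg (show ¬ (4:ℕ) ∣ 4 * t + 3 by omega), if_neg (show ¬ (4 * t + 3) % 4 ≤ 1 by omega)]
    simp only [Finset.sum_range_succ, Finset.sum_range_zero]
    rw [if_neg (show ¬ (8:ℕ) ∣ 10 * (4 * t + 3) + 0 by omega),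
        if_neg (show ¬ (8:ℕ) ∣ 10 * (4 * t + 3) + 1 by omega),
        if_pos (show (8:ℕ) ∣ 10 * (4 * t + 3) + 2 by omega),
        if_neg (show ¬ (8:ℕ) ∣ 10 * (4 * t + 3) + 3 by omega),
        if_neg (show ¬ (8:ℕ) ∣ 10 * (4 * t + 3) + 4 by omega),
        if_neg (show ¬ (8:ℕ) ∣ 10 * (4 * t + 3) + 5 by omega),
        if_neg (show ¬ (8:ℕ) ∣ 10 * (4 * t + 3) + 6 by omega),
        if_neg (show ¬ (8:ℕ) ∣ 10 * (4 * t + 3) + 7 by omega),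
        if_neg (show ¬ (8:ℕ) ∣ 10 * (4 * t + 3) + 8 by omega),
        if_neg (show ¬ (8:ℕ) ∣ 10 * (4 * t + 3) + 9 by omega)]
    norm_num [luckN]

-- ---- outer-sum helpers ----
lemma pvT_one (n : ℕ) : pvT 1 n = ∑ x ∈ Finset.range n, pvG x := by
  unfold pvT; simp

lemma pv_cnt (Q : ℕ) :
    (∑ q ∈ Finset.range Q, if q % 4 ≤ 1 then 1 else 0) = 2 * (Q / 4) + min (Q % 4) 2 := by
  induction Q with
  | zero => simp
  | succ Q ih =>
      rw [Finset.sum_range_succ, ih]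
      split <;> omega


-- ---- list-sum bridge ----
lemma pv_list_sum_range (f : ℕ → Int) (n : ℕ) :
    ((List.range n).map f).sum = ∑ i ∈ Finset.range n, f i := by
  induction n with
  | zero => simp
  | succ n ih => rw [List.range_succ, Finset.sum_range_succ, List.map_append, List.sum_append, ih]; simp

-- ---- outer closed forms: summing the inner forms over q < Q ----
lemma pv_outer1 (Q : ℕ) :
    (∑ q ∈ Finset.range Q, ∑ r ∈ Finset.range 10, if 1 ∣ 10 * q + r then pvG q + luckN r else 0)
      = 10 * pvT 1 Q + 2 * Q := by
  rw [Finset.sum_congr rfl fun q _ => pv_inner1 q, Finset.sum_add_distrib, pvT_one,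
    Finset.mul_sum, Finset.sum_const, Finset.card_range, smul_eq_mul]
  ring

lemma pv_outer2 (Q : ℕ) :
    (∑ q ∈ Finset.range Q, ∑ r ∈ Finset.range 10, if 2 ∣ 10 * q + r then pvG q + luckN r else 0)
      = 5 * pvT 1 Q + 2 * Q := by
  rw [Finset.sum_congr rfl fun q _ => pv_inner2 q, Finset.sum_add_distrib, pvT_one,
    Finset.mul_sum, Finset.sum_const, Finset.card_range, smul_eq_mul]
  ring

lemma pv_outer4 (Q : ℕ) :
    (∑ q ∈ Finset.range Q, ∑ r ∈ Finset.range 10, if 4 ∣ 10 * q + r then pvG q + luckN r else 0)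
      = 2 * pvT 1 Q + pvT 2 Q + Q := by
  rw [Finset.sum_congr rfl fun q _ => pv_inner4 q, Finset.sum_add_distrib,
    Finset.sum_add_distrib, pvT_one, Finset.mul_sum, Finset.sum_const, Finset.card_range,
    smul_eq_mul]
  unfold pvT
  ring

lemma pv_outer8 (Q : ℕ) :
    (∑ q ∈ Finset.range Q, ∑ r ∈ Finset.range 10, if 8 ∣ 10 * q + r then pvG q + luckN r else 0)
      = pvT 1 Q + pvT 4 Q + (2 * (Q / 4) + min (Q % 4) 2) := by
  rw [Finset.sum_congr rfl fun q _ => pv_inner8 q, Finset.sum_add_distrib,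
    Finset.sum_add_distrib, pvT_one, pv_cnt]
  unfold pvT
  ring

-- ---- the trailing partial block of pvS, as a cast of the ℕ-side partial sum ----
lemma pv_partial (mi : Int) (m' : ℕ) (hm : mi = (m' : Int)) (Q D : ℕ) :
    (∑ k ∈ Finset.range D,
        if PySem.Int.mod (10 * ((Q : ℕ) : Int) + ((0 : Int) + (k : Int))) mi = 0
        then ((pvG Q : ℕ) : Int) + pvLuck ((0 : Int) + (k : Int)) else 0)
      = ((∑ r ∈ Finset.range D, if m' ∣ 10 * Q + r then pvG Q + luckN r else 0 : ℕ) : Int) := by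
  rw [Nat.cast_sum]
  refine Finset.sum_congr rfl fun k _ => ?_
  have hcond : (PySem.Int.mod (10 * ((Q : ℕ) : Int) + ((0 : Int) + (k : Int))) mi = 0)
      ↔ (m' ∣ 10 * Q + k) := by
    rw [PySem.Int.mod_eq_zero_iff_dvd, hm]
    constructor
    · intro h
      exact_mod_cast (by push_cast; convert h using 1; ring : ((m' : Int)) ∣ ((10 * Q + k : ℕ) : Int))
    · intro h
      have : ((m' : Int)) ∣ ((10 * Q + k : ℕ) : Int) := Int.natCast_dvd_natCast.mpr h
      convert this using 1
      push_cast; ring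
  by_cases h : m' ∣ 10 * Q + k
  · rw [if_pos (hcond.mpr h), if_pos h]
    rw [show ((0 : Int) + (k : Int)) = ((k : ℕ) : Int) by ring, pvLuck_cast]
    push_cast; ring
  · rw [if_neg (fun hh => h (hcond.mp hh)), if_neg h]
    simp

-- ---- the main recursion: pvS computes pvT ----
lemma pvSF_neg (fuel : ℕ) (m M : Int) (h : M < 0) : pvSF fuel m M = 0 := by
  cases fuel with
  | zero => rw [pvSF]
  | succ f => rw [pvSF, if_pos h]

lemma pvS_neg (m M : Int) (h : M < 0) : pvS m M = 0 := by
  unfold pvS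
  exact pvSF_neg _ m M h

lemma pvSF_main : ∀ (fuel : ℕ), ∀ n : ℕ, n < fuel →
    pvSF fuel 1 (n : Int) = (pvT 1 (n + 1) : Int) ∧ pvSF fuel 2 (n : Int) = (pvT 2 (n + 1) : Int)
      ∧ pvSF fuel 4 (n : Int) = (pvT 4 (n + 1) : Int) ∧ pvSF fuel 8 (n : Int) = (pvT 8 (n + 1) : Int) := by
  intro fuel
  induction fuel using Nat.strong_induction_on with
  | _ fuel ih =>
    intro n hn
    obtain ⟨f, rfl⟩ : ∃ f, fuel = f + 1 := ⟨fuel - 1, by omega⟩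
    have hQ : PySem.Int.floordiv ((n : ℕ) : Int) 10 = ((n / 10 : ℕ) : Int) := by
      exact_mod_cast PySem.Int.floordiv_natCast n 10
    have hd : PySem.Int.mod ((n : ℕ) : Int) 10 = ((n % 10 : ℕ) : Int) := by
      exact_mod_cast PySem.Int.mod_natCast n 10
    have hnn : ¬ ((n : ℕ) : Int) < 0 := by omega
    -- the recursive calls: pvSF f m' (Q - 1) = pvT m' Q
    have hpred : ∀ m' : ℕ,
        (∀ j : ℕ, j < f → pvSF f (m' : Int) (j : Int) = (pvT m' (j + 1) : Int)) →
        pvSF f (m' : Int) (((n / 10 : ℕ) : Int) - 1) = (pvT m' (n / 10) : Int) := by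
      intro m' hj
      by_cases hz : n / 10 = 0
      · rw [hz, pvSF_neg f _ _ (by omega)]
        unfold pvT
        simp
      · have h1 : (((n / 10 : ℕ) : Int) - 1) = ((n / 10 - 1 : ℕ) : Int) := by omega
        have h2 : n / 10 - 1 < f := by omega
        rw [h1, hj _ h2, Nat.sub_add_cancel (by omega)]
    have ih1 : ∀ j : ℕ, j < f → pvSF f ((1:ℕ) : Int) (j : Int) = (pvT 1 (j + 1) : Int) := by
      intro j hjf; exact_mod_cast (ih f (by omega) j hjf).1
    have ih2 : ∀ j : ℕ, j < f → pvSF f ((2:ℕ) : Int) (j : Int) = (pvT 2 (j + 1) : Int) := by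
      intro j hjf; exact_mod_cast (ih f (by omega) j hjf).2.1
    have ih4 : ∀ j : ℕ, j < f → pvSF f ((4:ℕ) : Int) (j : Int) = (pvT 4 (j + 1) : Int) := by
      intro j hjf; exact_mod_cast (ih f (by omega) j hjf).2.2.1
    have hp1 := hpred 1 ih1
    have hp2 := hpred 2 ih2
    have hp4 := hpred 4 ih4
    have hp1' : pvSF f 1 (((n / 10 : ℕ) : Int) - 1) = (pvT 1 (n / 10) : Int) := by exact_mod_cast hp1
    have hp2' : pvSF f 2 (((n / 10 : ℕ) : Int) - 1) = (pvT 2 (n / 10) : Int) := by exact_mod_cast hp2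
    have hp4' : pvSF f 4 (((n / 10 : ℕ) : Int) - 1) = (pvT 4 (n / 10) : Int) := by exact_mod_cast hp4
    have hfQ : pvFLoop ((n / 10 : ℕ) : Int) 0 = ((pvG (n / 10) : ℕ) : Int) := by
      rw [pvFLoop_eq_pvG]; ring
    -- the trailing loop of pvSF, for any initial value res
    have hloop : ∀ (mi : Int) (m' : ℕ), mi = (m' : Int) → ∀ res : Int,
        (PySem.List.pyRange 0 (((n % 10 : ℕ) : Int) + 1) 1).foldl
          (fun res r => if PySem.Int.mod (10 * ((n / 10 : ℕ) : Int) + r) mi = 0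
                        then res + pvFLoop ((n / 10 : ℕ) : Int) 0 + pvLuck r else res) res
          = res + ((∑ r ∈ Finset.range (n % 10 + 1),
              if m' ∣ 10 * (n / 10) + r then pvG (n / 10) + luckN r else 0 : ℕ) : Int) := by
      intro mi m' hm res
      rw [PySem.List.pyRange_one]
      have hlen : ((((n % 10 : ℕ) : Int) + 1) - 0).toNat = n % 10 + 1 := by omega
      rw [hlen, List.foldl_map]
      have hfun : (fun (res : Int) (k : ℕ) =>
            if PySem.Int.mod (10 * ((n / 10 : ℕ) : Int) + ((0:Int) + (k : Int))) mi = 0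
            then res + pvFLoop ((n / 10 : ℕ) : Int) 0 + pvLuck ((0:Int) + (k : Int)) else res)
          = fun (res : Int) (k : ℕ) => res +
              (if PySem.Int.mod (10 * ((n / 10 : ℕ) : Int) + ((0:Int) + (k : Int))) mi = 0
               then pvFLoop ((n / 10 : ℕ) : Int) 0 + pvLuck ((0:Int) + (k : Int)) else 0) := by
        funext res k
        split <;> ring
      rw [hfun, PySem.List.foldl_add, pv_list_sum_range]
      congr 1
      rw [← pv_partial mi m' hm (n / 10) (n % 10 + 1)]
      refine Finset.sum_congr rfl fun k _ => ?_
      rw [hfQ]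
    have key : ∀ (mi : Int) (m' : ℕ), mi = (m' : Int) →
        ∀ res : Int,
        res = ((∑ q ∈ Finset.range (n / 10), ∑ r ∈ Finset.range 10,
            if m' ∣ 10 * q + r then pvG q + luckN r else 0 : ℕ) : Int) →
        (PySem.List.pyRange 0 (((n % 10 : ℕ) : Int) + 1) 1).foldl
          (fun res r => if PySem.Int.mod (10 * ((n / 10 : ℕ) : Int) + r) mi = 0
                        then res + pvFLoop ((n / 10 : ℕ) : Int) 0 + pvLuck r else res) res
          = (pvT m' (n + 1) : Int) := by
      intro mi m' hm res hres
      rw [hloop mi m' hm res, hres, pvT_decompose m' n]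
      push_cast
      ring
    refine ⟨?_, ?_, ?_, ?_⟩
    · rw [pvSF, if_neg hnn]
      norm_num only
      simp only [hQ, hd]
      exact key 1 1 (by norm_num) _ (by rw [hp1', pv_outer1]; push_cast; ring)
    · rw [pvSF, if_neg hnn]
      norm_num only
      simp only [hQ, hd]
      exact key 2 2 (by norm_num) _ (by rw [hp1', pv_outer2]; push_cast; ring)
    · rw [pvSF, if_neg hnn]
      norm_num only
      simp only [hQ, hd]
      exact key 4 4 (by norm_num) _ (by rw [hp1', hp2', pv_outer4]; push_cast; ring)
    · rw [pvSF, if_neg hnn]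
      norm_num only
      simp only [hQ, hd]
      have hQ4 : PySem.Int.floordiv ((n / 10 : ℕ) : Int) 4 = ((n / 10 / 4 : ℕ) : Int) := by
        exact_mod_cast PySem.Int.floordiv_natCast (n / 10) 4
      have hd4 : PySem.Int.mod ((n / 10 : ℕ) : Int) 4 = ((n / 10 % 4 : ℕ) : Int) := by
        exact_mod_cast PySem.Int.mod_natCast (n / 10) 4
      rw [hQ4, hd4]
      refine key 8 8 (by norm_num) _ ?_
      rw [hp1', hp4', pv_outer8]
      push_cast
      ring

lemma pvS_main8 (n : ℕ) : pvS 8 (n : Int) = (pvT 8 (n + 1) : Int) := by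
  unfold pvS
  have hfuel : ((((n : ℕ) : Int) + 1).toNat + 1) = n + 2 := by omega
  rw [hfuel]
  exact (pvSF_main (n + 2) n (by omega)).2.2.2

-- ---- pvT 8 as a sum over multiples of 8 ----
lemma pvT8_mult (n : ℕ) :
    pvT 8 (n + 1) = ∑ k ∈ Finset.range (n / 8 + 1), pvG (8 * k) := by
  induction n with
  | zero =>
      unfold pvT
      simp [pvG_zero]
  | succ n ih =>
      have hstep : pvT 8 (n + 1 + 1) = pvT 8 (n + 1) + (if 8 ∣ (n + 1) then pvG (n + 1) else 0) := by
        unfold pvT; rw [Finset.sum_range_succ]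
      by_cases h8 : 8 ∣ (n + 1)
      · have hq : (n + 1) / 8 = n / 8 + 1 := by omega
        have hv : n + 1 = 8 * ((n + 1) / 8) := by omega
        rw [hq] at hv
        rw [hstep, if_pos h8, ih, hq, hv]
        conv_rhs => rw [Finset.sum_range_succ]
      · have hq : (n + 1) / 8 = n / 8 := by omega
        rw [hstep, if_neg h8, ih, hq]
        simp

-- A's accumulator splits off
lemma pvDigitLoopF_acc : ∀ (fuel : ℕ) (m t : Int),
    pvDigitLoopF fuel m t = t + pvDigitLoopF fuel m 0 := by
  intro fuel
  induction fuel with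
  | zero =>
    intro m t
    rw [pvDigitLoopF, pvDigitLoopF]
    ring
  | succ f ih =>
    intro m t
    rw [pvDigitLoopF]
    conv_rhs => rw [pvDigitLoopF]
    by_cases h : m > 0
    · rw [if_pos h, if_pos h]
      rw [ih (PySem.Int.floordiv m 10)
            (if PySem.Int.mod m 10 = 6 ∨ PySem.Int.mod m 10 = 8 then t + 1 else t),
          ih (PySem.Int.floordiv m 10)
            (if PySem.Int.mod m 10 = 6 ∨ PySem.Int.mod m 10 = 8 then (0:Int) + 1 else 0)]
      split_ifs <;> ring
    · rw [if_neg h, if_neg h]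
      ring

lemma pvDigitLoop_acc (m t : Int) : pvDigitLoop m t = t + pvDigitLoop m 0 := by
  unfold pvDigitLoop
  exact pvDigitLoopF_acc _ m t

-- ---- A equals pvT 8 ----
lemma pvA_eq (n : ℕ) : count_lucky_digits (n : Int) = (pvT 8 (n + 1) : Int) := by
  unfold count_lucky_digits
  have hc : PySem.Int.floordiv ((n : ℕ) : Int) 8 = ((n / 8 : ℕ) : Int) := by
    exact_mod_cast PySem.Int.floordiv_natCast n 8
  rw [hc, PySem.List.pyRange_one]
  have hlen : ((((n / 8 : ℕ) : Int) + 1) - 1).toNat = n / 8 := by omega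
  rw [hlen, List.foldl_map]
  have hfun : (fun (t : Int) (k : ℕ) => pvDigitLoop (8 * ((1:Int) + (k : Int))) t)
      = fun (t : Int) (k : ℕ) => t + pvDigitLoop (8 * ((1:Int) + (k : Int))) 0 := by
    funext t k
    exact pvDigitLoop_acc _ t
  rw [hfun, PySem.List.foldl_add, pv_list_sum_range]
  have hterm : ∀ k : ℕ, pvDigitLoop (8 * ((1:Int) + (k : Int))) 0 = ((pvG (8 * (k + 1)) : ℕ) : Int) := by
    intro k
    have hcast : (8 * ((1:Int) + (k : Int))) = ((8 * (k + 1) : ℕ) : Int) := by push_cast; ring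
    rw [hcast, pvDigitLoop_eq_pvG]
    ring
  rw [Finset.sum_congr rfl fun k _ => hterm k, pvT8_mult, Finset.sum_range_succ']
  rw [Nat.mul_zero, pvG_zero]
  push_cast
  ring

-- ---- B equals pvT 8 ----
lemma pvB_eq (n : ℕ) : count_lucky_digits_alt (n : Int) = (pvT 8 (n + 1) : Int) := by
  unfold count_lucky_digits_alt
  exact pvS_main8 n

-- ===== VERDICT (by name: the statement is the Claim_ definition above) =====
theorem count_lucky_digits_spec : Claim_equal_count_lucky_digits := by
  intro N _
  unfold Spec_count_lucky_digits
  by_cases hN : 0 ≤ N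
  · obtain ⟨n, rfl⟩ : ∃ n : ℕ, N = (n : Int) := ⟨N.toNat, (Int.toNat_of_nonneg hN).symm⟩
    rw [pvA_eq, pvB_eq]
  · -- N < 0: both sides are 0
    have hneg : N < 0 := by omega
    have hB : count_lucky_digits_alt N = 0 := pvS_neg 8 N hneg
    have hA : count_lucky_digits N = 0 := by
      unfold count_lucky_digits
      have hc : PySem.Int.floordiv N 8 + 1 ≤ 1 := by
        rw [PySem.Int.floordiv_eq_ediv_of_pos (by norm_num : (0:Int) < 8)]
        omega
      rw [PySem.List.pyRange_one_eq_nil hc]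
      rfl
    rw [hA, hB]
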